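-- pv_equiv track=rewrite | github.com/Wlodeks939/HelsinkiPythonMOOC2024 | Part12/part12-08_even_numbers/src/even_numbers.py | even_numbers
-- ===== SOURCE A (Python) =====
-- def even_numbers(beginning: int, maximum: int):
--
--     if beginning % 2 == 0:
--         primer_num = beginning
--     else:
--         primer_num = beginning + 1
--
--     if maximum % 2 == 0:
--         ultimo_num = maximum
--     else:
--         ultimo_num = maximum - 1
--
--     while primer_num <= ultimo_num:
--         yield primer_num
--         primer_num += 2
-- ===== SOURCE B (Python) =====
-- def even_numbers(beginning: int, maximum: int):
--     for n in range(beginning, maximum + 1):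
--         if n % 2 == 0:
--             yield n
-- ===== Notes on version B (the rewrite author's own statement) =====
-- stated objective: simpler
-- what changed: B replaces A's parity-adjusted endpoint computation and step-2 while loop with a single filtering pass over the full inclusive range, yielding each even number.
import Mathlib
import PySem

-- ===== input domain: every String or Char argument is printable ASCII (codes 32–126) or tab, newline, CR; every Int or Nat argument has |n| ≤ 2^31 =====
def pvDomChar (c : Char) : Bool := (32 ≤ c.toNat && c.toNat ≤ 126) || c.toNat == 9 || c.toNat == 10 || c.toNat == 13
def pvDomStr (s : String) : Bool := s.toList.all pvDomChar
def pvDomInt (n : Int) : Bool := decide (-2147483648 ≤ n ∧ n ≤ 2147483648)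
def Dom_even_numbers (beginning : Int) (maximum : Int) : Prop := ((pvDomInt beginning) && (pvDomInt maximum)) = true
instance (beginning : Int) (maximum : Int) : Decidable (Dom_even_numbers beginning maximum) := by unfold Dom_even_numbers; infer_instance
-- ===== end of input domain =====

-- B drops A's parity-adjusted endpoints and step-2 while loop for a single filtering pass over the inclusive range (objective: simpler).

-- ===== PORT A =====
-- the while loop: yield primer_num, primer_num += 2, while primer_num <= ultimo_num
def pvEvenLoop (primer ultimo : Int) : List Int :=
  if primer ≤ ultimo then primer :: pvEvenLoop (primer + 2) ultimo else []
termination_by (ultimo + 1 - primer).toNat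
decreasing_by omega

def even_numbers (beginning : Int) (maximum : Int) : List Int :=
  let primer_num := if PySem.Int.mod beginning 2 = 0 then beginning else beginning + 1
  let ultimo_num := if PySem.Int.mod maximum 2 = 0 then maximum else maximum - 1
  pvEvenLoop primer_num ultimo_num

-- ===== PORT B =====
def even_numbers_alt (beginning : Int) (maximum : Int) : List Int :=
  (PySem.List.pyRange beginning (maximum + 1) 1).filter (fun n => PySem.Int.mod n 2 == 0)

-- ===== PRECONDITION & SPEC =====
def Spec_even_numbers (beginning : Int) (maximum : Int) (out : List Int) : Prop := out = even_numbers_alt beginning maximum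
instance (beginning : Int) (maximum : Int) (out : List Int) : Decidable (Spec_even_numbers beginning maximum out) := by unfold Spec_even_numbers; infer_instance

-- ===== CLAIM (what is proved, stated in full; the proofs are below) =====
def Claim_equal_even_numbers : Prop := ∀ (beginning : Int) (maximum : Int), Dom_even_numbers beginning maximum → Spec_even_numbers beginning maximum (even_numbers beginning maximum)

-- ===== LEMMAS AND PROOFS =====

theorem pvMod2 (n : Int) : PySem.Int.mod n 2 = 0 ↔ (2 : Int) ∣ n :=
  PySem.Int.mod_eq_zero_iff_dvd n 2

-- the core invariant: A's step-2 loop starting at the first even ≥ a equals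
-- B's filter over range(a, b+1)
theorem pvLoop_eq_filter (n : Nat) :
    ∀ a b : Int, (b + 1 - a).toNat = n →
    pvEvenLoop (if PySem.Int.mod a 2 = 0 then a else a + 1)
               (if PySem.Int.mod b 2 = 0 then b else b - 1) =
    (PySem.List.pyRange a (b + 1) 1).filter (fun m => PySem.Int.mod m 2 == 0) := by
  induction n with
  | zero =>
    intro a b h
    have hba : b + 1 ≤ a := by omega
    rw [PySem.List.pyRange_one_eq_nil hba]
    rw [pvEvenLoop]
    have h2 : ¬ (if PySem.Int.mod a 2 = 0 then a else a + 1) ≤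
              (if PySem.Int.mod b 2 = 0 then b else b - 1) := by
      simp only [pvMod2]
      split_ifs <;> omega
    rw [if_neg h2, List.filter_nil]
  | succ k ih =>
    intro a b h
    have hab : a < b + 1 := by omega
    rw [PySem.List.pyRange_one_cons hab, List.filter_cons]
    have ih' := ih (a + 1) b (by omega)
    by_cases ha : PySem.Int.mod a 2 = 0
    · -- a even: A's loop starts at a and yields a; B's filter keeps a
      have hda : (2 : Int) ∣ a := (pvMod2 a).mp ha
      have ha1 : ¬ PySem.Int.mod (a + 1) 2 = 0 := by
        intro hc; have := (pvMod2 (a + 1)).mp hc; omega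
      rw [if_neg ha1, show a + 1 + 1 = a + 2 from by ring] at ih'
      have hle : a ≤ (if PySem.Int.mod b 2 = 0 then b else b - 1) := by
        by_cases hb : PySem.Int.mod b 2 = 0
        · rw [if_pos hb]; omega
        · rw [if_neg hb]
          have hnb : ¬ (2 : Int) ∣ b := fun hd => hb ((pvMod2 b).mpr hd)
          omega
      rw [if_pos ha, pvEvenLoop, if_pos hle, ih']
      simp only [pvMod2, beq_iff_eq]
      rw [if_pos hda]
    · -- a odd: A's loop starts at a + 1; B's filter drops a
      have hna : ¬ (2 : Int) ∣ a := fun hd => ha ((pvMod2 a).mpr hd)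
      have ha2 : (2 : Int) ∣ a + 1 := by omega
      have h1 : (if PySem.Int.mod (a + 1) 2 = 0 then a + 1 else a + 1 + 1) = a + 1 :=
        if_pos ((pvMod2 (a + 1)).mpr ha2)
      rw [h1] at ih'
      rw [if_neg ha, ih']
      simp only [pvMod2, beq_iff_eq]
      rw [if_neg hna]

-- ===== VERDICT (by name: the statement is the Claim_ definition above) =====
theorem even_numbers_spec : Claim_equal_even_numbers := by
  intro a b _
  show even_numbers a b = even_numbers_alt a b
  unfold even_numbers even_numbers_alt
  exact pvLoop_eq_filter (b + 1 - a).toNat a b rfl
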